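-- pv_equiv track=rewrite | github.com/kunheek/loopkit | src/loopkit/config.py | _preprocess_overrides
-- ===== SOURCE A (Python) =====
-- from typing import (
--     Any,
--     Dict,
--     List,
--     Optional,
--     Type,
--     TypeVar,
--     Union,
--     get_args,
--     get_origin,
--     get_type_hints,
-- )
--
-- def _preprocess_overrides(overrides: List[str]) -> List[str]:
--     """Preprocess overrides to merge space-separated values into key=value format.
--
--     Handles patterns like:
--         ['+key:int', '128', '256', '512'] -> ['+key:int=[128,256,512]']
--         ['+key:str', 'train', 'val'] -> ['+key:str=["train","val"]']
--         ['+key=value'] -> ['+key=value']  # Already in correct format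
--
--     Args:
--         overrides: Raw list of override strings from parse_known_args()
--
--     Returns:
--         Processed list where space-separated values are merged
--     """
--     if not overrides:
--         return overrides
--
--     processed = []
--     i = 0
--
--     while i < len(overrides):
--         item = overrides[i]
--
--         # Check if this is a key without value (no '=' sign)
--         # and potentially followed by space-separated values
--         if item.startswith("+") and "=" not in item:
--             key = item
--             values = []
--             j = i + 1
--
--             # Collect following non-option values
--             while j < len(overrides) and not overrides[j].startswith(("+", "-")):
--                 values.append(overrides[j])
--                 j += 1
--
--             if values:
--                 # Determine if we have a type hint
--                 if ":" in key:
--                     # Extract type hint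
--                     key_part = key[1:]  # Remove '+'
--                     base_key, type_hint = key_part.rsplit(":", 1)
--                     type_hint = type_hint.lower()
--
--                     # Convert values based on type hint
--                     if len(values) == 1:
--                         # Single value - just use as-is
--                         processed.append(f"+{key_part}={values[0]}")
--                     else:
--                         # Multiple values - create JSON list with proper type
--                         if type_hint in ("int", "float"):
--                             # Numeric types - no quotes
--                             json_list = "[" + ",".join(values) + "]"
--                         else:
--                             # String or other types - add quotes
--                             json_list = '["' + '","'.join(values) + '"]'
--                         processed.append(f"+{key_part}={json_list}")
--                 else:
--                     # No type hint - auto-detect or create list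
--                     if len(values) == 1:
--                         processed.append(f"{key}={values[0]}")
--                     else:
--                         # Multiple values - create JSON list
--                         # Try to detect if all values are numeric
--                         try:
--                             # Try parsing as numbers
--                             float_vals = [float(v) for v in values]
--                             # Check if they're all integers
--                             if all(v.is_integer() for v in float_vals):
--                                 json_list = "[" + ",".join(values) + "]"
--                             else:
--                                 json_list = "[" + ",".join(values) + "]"
--                         except ValueError:
--                             # Not numeric - treat as strings
--                             json_list = '["' + '","'.join(values) + '"]'
--                         processed.append(f"{key}={json_list}")
--
--                 i = j
--             else:
--                 # Key without following values - keep as-is (will error later)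
--                 processed.append(item)
--                 i += 1
--         else:
--             # Already in key=value format or doesn't start with '+'
--             processed.append(item)
--             i += 1
--
--     return processed
-- ===== SOURCE B (Python) =====
-- def _format_group(key, values):
--     """Format a pending '+key' (possibly with ':type' hint) with its collected values."""
--     if not values:
--         return key
--     if ":" in key:
--         key_part = key[1:]
--         type_hint = key_part.rsplit(":", 1)[1].lower()
--         if len(values) == 1:
--             return "+" + key_part + "=" + values[0]
--         if type_hint in ("int", "float"):
--             return "+" + key_part + "=[" + ",".join(values) + "]"
--         return '+' + key_part + '=["' + '","'.join(values) + '"]'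
--     if len(values) == 1:
--         return key + "=" + values[0]
--     try:
--         for v in values:
--             float(v)
--         return key + "=[" + ",".join(values) + "]"
--     except ValueError:
--         return key + '=["' + '","'.join(values) + '"]'
--
--
-- def _preprocess_overrides(overrides):
--     out = []
--     key = None
--     vals = []
--     for tok in overrides:
--         if tok.startswith("+") and "=" not in tok:
--             if key is not None:
--                 out.append(_format_group(key, vals))
--             key, vals = tok, []
--         elif tok.startswith(("+", "-")):
--             if key is not None:
--                 out.append(_format_group(key, vals))
--                 key, vals = None, []
--             out.append(tok)
--         elif key is not None:
--             vals.append(tok)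
--         else:
--             out.append(tok)
--     if key is not None:
--         out.append(_format_group(key, vals))
--     return out
-- ===== Notes on version B (the rewrite author's own statement) =====
-- stated objective: simpler
-- what changed: A's index-jumping outer while-loop with a nested inner while that scans ahead for values is replaced by a single flat for-loop over the tokens maintaining a pending (key, values) accumulator that is flushed through one formatting helper.
import Mathlib
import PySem

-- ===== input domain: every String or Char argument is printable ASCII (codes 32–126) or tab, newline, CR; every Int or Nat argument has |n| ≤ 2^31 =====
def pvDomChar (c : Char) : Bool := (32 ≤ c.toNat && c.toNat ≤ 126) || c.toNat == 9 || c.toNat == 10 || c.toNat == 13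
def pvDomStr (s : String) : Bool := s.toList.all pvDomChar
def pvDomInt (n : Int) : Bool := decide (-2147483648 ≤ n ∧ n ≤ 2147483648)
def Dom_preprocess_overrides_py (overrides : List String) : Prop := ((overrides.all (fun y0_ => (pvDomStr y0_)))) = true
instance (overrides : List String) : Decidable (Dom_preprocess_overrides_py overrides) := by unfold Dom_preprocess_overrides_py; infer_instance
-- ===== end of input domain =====

-- B replaces A's index-jumping nested while-loops by a single flat pass with a pending-group
-- state machine (objective: simpler); same return value on every input.

-- ===== SHARED HELPERS (both Pythons call the same built-ins: str.startswith, float()) =====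

-- item.startswith("+") and "=" not in item
def isKeyTok (s : String) : Bool := PySem.Str.startswith s "+" && !(PySem.Str.isIn "=" s)
-- s.startswith(("+", "-"))
def isStopTok (s : String) : Bool := PySem.Str.startswith s "+" || PySem.Str.startswith s "-"

-- ---- hand port of CPython float(str) SUCCESS (ValueError = false); exact on the printable-ASCII
-- domain (float's value is never used by either Python — only whether it raises ValueError).
def isFloatSpace (c : Char) : Bool :=
  c == ' ' || c == '\t' || c == '\n' || c == '\r' || c.toNat == 11 || c.toNat == 12

-- consume (('_')? digit)* : underscores only between digits
def digitsRest : List Char → List Char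
  | [] => []
  | c :: r =>
    if c.isDigit then digitsRest r
    else if c == '_' then
      match r with
      | d :: r2 => if d.isDigit then digitsRest r2 else c :: r
      | [] => c :: r
    else c :: r
termination_by l => l.length

-- digitpart := digit (('_')? digit)* ; returns the remaining suffix, none if no leading digit
def digitpart? : List Char → Option (List Char)
  | [] => none
  | c :: r => if c.isDigit then some (digitsRest r) else none

-- optional exponent then end of string
def expEnd : List Char → Bool
  | [] => true
  | c :: r =>
    if c == 'e' || c == 'E' then
      let r2 := match r with
        | s :: rr => if s == '+' || s == '-' then rr else s :: rr
        | [] => []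
      match digitpart? r2 with
      | some [] => true
      | _ => false
    else false

-- (digitpart ['.' [digitpart]] | '.' digitpart) [exponent]
def numberOk : List Char → Bool
  | '.' :: r => (match digitpart? r with | some rest => expEnd rest | none => false)
  | cs =>
    match digitpart? cs with
    | none => false
    | some rest =>
      match rest with
      | '.' :: r =>
        (match r with
         | d :: _ =>
            if d.isDigit then (match digitpart? r with | some rr => expEnd rr | none => false)
            else expEnd r
         | [] => expEnd r)
      | _ => expEnd rest

-- float(s) succeeds: strip C whitespace, optional sign, then inf/infinity/nan (any case) or a number
def pyFloatOk (s : String) : Bool :=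
  let cs := ((s.toList.dropWhile isFloatSpace).reverse.dropWhile isFloatSpace).reverse
  let cs2 := match cs with
    | c :: r => if c == '+' || c == '-' then r else c :: r
    | [] => []
  let low := PySem.Chars.lower cs2
  if low == "inf".toList || low == "infinity".toList || low == "nan".toList then true
  else numberOk cs2

-- type_hint = key_part.rsplit(":", 1)[1]  (key_part always contains ':' where this is used)
def afterLastColon (cs : List Char) : List Char :=
  (cs.reverse.takeWhile (fun c => c != ':')).reverse

-- ===== PORT A =====

-- the value-formatting block of A's key branch (values may be []: A then keeps the key as-is)
def fmtA (key : String) (values : List String) : String :=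
  match values with
  | [] => key
  | v0 :: vrest =>
    if PySem.Str.isIn ":" key then
      let key_part := String.ofList (key.toList.drop 1)          -- key[1:]
      let type_hint := PySem.Chars.lower (afterLastColon key_part.toList)
      match vrest with
      | [] => String.ofList ('+' :: key_part.toList ++ '=' :: v0.toList)
      | _ =>
        if type_hint == "int".toList || type_hint == "float".toList then
          String.ofList ('+' :: key_part.toList ++ '=' :: '[' :: (PySem.Str.join "," values).toList ++ [']'])
        else
          String.ofList ('+' :: key_part.toList ++ "=[\"".toList ++ (PySem.Str.join "\",\"" values).toList ++ "\"]".toList)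
    else
      match vrest with
      | [] => String.ofList (key.toList ++ '=' :: v0.toList)
      | _ =>
        -- A's try/except: both is_integer branches build the identical string, so only
        -- float()-success matters; the numeric branches are elided as equal literals
        if values.all pyFloatOk then
          String.ofList (key.toList ++ '=' :: '[' :: (PySem.Str.join "," values).toList ++ [']'])
        else
          String.ofList (key.toList ++ "=[\"".toList ++ (PySem.Str.join "\",\"" values).toList ++ "\"]".toList)

-- inner while: collect following tokens not starting with '+'/'-'; returns (values, rest-from-j)
def collectA : List String → List String × List String
  | [] => ([], [])
  | t :: rest =>
    if isStopTok t then ([], t :: rest)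
    else
      let p := collectA rest
      (t :: p.1, p.2)

theorem collectA_snd_length (l : List String) : (collectA l).2.length ≤ l.length := by
  induction l with
  | nil => simp [collectA]
  | cons t rest ih =>
    simp only [collectA]
    split
    · simp
    · simpa using Nat.le_succ_of_le ih

-- outer while over the suffix starting at i
def goA : List String → List String
  | [] => []
  | item :: rest =>
    if isKeyTok item then
      let p := collectA rest
      if p.1.isEmpty then item :: goA rest
      else fmtA item p.1 :: goA p.2
    else item :: goA rest
termination_by l => l.length
decreasing_by
  · simp
  · have := collectA_snd_length rest; simp; omega
  · simp

def preprocess_overrides_py (overrides : List String) : List String :=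
  if overrides.isEmpty then overrides else goA overrides

-- ===== PORT B =====

-- _format_group(key, values) of Source B (same formatting decisions as A's inline block)
def fmtB (key : String) (values : List String) : String :=
  match values with
  | [] => key
  | v0 :: vrest =>
    if PySem.Str.isIn ":" key then
      let key_part := String.ofList (key.toList.drop 1)
      let type_hint := PySem.Chars.lower (afterLastColon key_part.toList)
      match vrest with
      | [] => String.ofList ('+' :: key_part.toList ++ '=' :: v0.toList)
      | _ =>
        if type_hint == "int".toList || type_hint == "float".toList then
          String.ofList ('+' :: key_part.toList ++ '=' :: '[' :: (PySem.Str.join "," values).toList ++ [']'])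
        else
          String.ofList ('+' :: key_part.toList ++ "=[\"".toList ++ (PySem.Str.join "\",\"" values).toList ++ "\"]".toList)
    else
      match vrest with
      | [] => String.ofList (key.toList ++ '=' :: v0.toList)
      | _ =>
        if values.all pyFloatOk then
          String.ofList (key.toList ++ '=' :: '[' :: (PySem.Str.join "," values).toList ++ [']'])
        else
          String.ofList (key.toList ++ "=[\"".toList ++ (PySem.Str.join "\",\"" values).toList ++ "\"]".toList)

-- state: (out, pending group); flushing emits the formatted pending group
def flushB (st : List String × Option (String × List String)) : List String :=
  match st.2 with
  | none => st.1
  | some (k, vs) => st.1 ++ [fmtB k vs]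

def stepB (st : List String × Option (String × List String)) (tok : String) :
    List String × Option (String × List String) :=
  if isKeyTok tok then (flushB st, some (tok, []))
  else if isStopTok tok then (flushB st ++ [tok], none)
  else
    match st.2 with
    | some (k, vs) => (st.1, some (k, vs ++ [tok]))
    | none => (st.1 ++ [tok], none)

def preprocess_overrides_py_alt (overrides : List String) : List String :=
  flushB (overrides.foldl stepB ([], none))

-- ===== PRECONDITION & SPEC =====
def Spec_preprocess_overrides_py (overrides : List String) (out : List String) : Prop := out = preprocess_overrides_py_alt overrides
instance (overrides : List String) (out : List String) : Decidable (Spec_preprocess_overrides_py overrides out) := by unfold Spec_preprocess_overrides_py; infer_instance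

-- ===== CLAIM (what is proved, stated in full; the proofs are below) =====
def Claim_equal_preprocess_overrides_py : Prop := ∀ (overrides : List String), Dom_preprocess_overrides_py overrides → Spec_preprocess_overrides_py overrides (preprocess_overrides_py overrides)

-- ===== LEMMAS AND PROOFS =====

theorem fmt_eq : fmtA = fmtB := rfl

theorem stop_of_key {t : String} (h : isKeyTok t = true) : isStopTok t = true := by
  simp only [isKeyTok, Bool.and_eq_true] at h
  simp only [isStopTok, Bool.or_eq_true]
  exact Or.inl h.1

theorem collectA_fst_nil {l : List String} (h : (collectA l).1 = []) : (collectA l).2 = l := by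
  cases l with
  | nil => rfl
  | cons t rest =>
    by_cases hs : isStopTok t = true
    · simp [collectA, hs]
    · simp [collectA, hs] at h

-- running B's machine with a pending group equals flushing it after A's inner collection
theorem runB_pending (l : List String) : ∀ (out : List String) (k : String) (vs : List String),
    flushB (l.foldl stepB (out, some (k, vs))) =
    flushB ((collectA l).2.foldl stepB (out ++ [fmtB k (vs ++ (collectA l).1)], none)) := by
  induction l with
  | nil => intro out k vs; simp [collectA, flushB]
  | cons t rest ih =>
    intro out k vs
    by_cases hk : isKeyTok t = true
    · have hs := stop_of_key hk
      simp [collectA, hs, List.foldl_cons, stepB, hk, flushB]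
    · by_cases hs : isStopTok t = true
      · simp [collectA, hs, List.foldl_cons, stepB, hk, flushB]
      · have hcol : collectA (t :: rest) = (t :: (collectA rest).1, (collectA rest).2) := by
          simp [collectA, hs]
        have hstep : stepB (out, some (k, vs)) t = (out, some (k, vs ++ [t])) := by
          simp [stepB, hk, hs]
        rw [hcol, List.foldl_cons, hstep, ih out k (vs ++ [t])]
        simp

-- running B's machine with no pending group appends goA of the remainder
theorem runB_none (n : Nat) : ∀ (l : List String), l.length ≤ n → ∀ (out : List String),
    flushB (l.foldl stepB (out, none)) = out ++ goA l := by
  induction n with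
  | zero =>
    intro l hl out
    have : l = [] := List.eq_nil_of_length_eq_zero (Nat.le_zero.mp hl)
    subst this; simp [goA, flushB]
  | succ n ih =>
    intro l hl out
    cases l with
    | nil => simp [goA, flushB]
    | cons t rest =>
      simp only [List.length_cons, Nat.succ_le_succ_iff] at hl
      by_cases hk : isKeyTok t = true
      · have h1 : stepB (out, none) t = (out, some (t, [])) := by
          simp [stepB, hk, flushB]
        rw [List.foldl_cons, h1, runB_pending,
          ih (collectA rest).2 (le_trans (collectA_snd_length rest) hl)]
        by_cases he : (collectA rest).1 = []
        · rw [he, collectA_fst_nil he]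
          simp [goA, hk, he, fmtB]
        · have hgo : goA (t :: rest) = fmtA t (collectA rest).1 :: goA (collectA rest).2 := by
            simp [goA, hk, List.isEmpty_iff, he]
          rw [hgo, fmt_eq]
          simp
      · have h1 : stepB (out, none) t = (out ++ [t], none) := by
          by_cases hs : isStopTok t = true <;> simp [stepB, hk, hs, flushB]
        rw [List.foldl_cons, h1, ih rest hl]
        simp [goA, hk]

-- ===== VERDICT (by name: the statement is the Claim_ definition above) =====
theorem preprocess_overrides_py_spec : Claim_equal_preprocess_overrides_py := by
  intro overrides _
  unfold Spec_preprocess_overrides_py preprocess_overrides_py preprocess_overrides_py_alt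
  rw [runB_none overrides.length overrides (le_refl _) []]
  cases overrides <;> simp [goA]
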